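-- pv_equiv track=rewrite | github.com/AnHu2410/MEWSMET_code | use_deepmet/preprocess_for_deepmet.py | get_all_local_contexts
-- ===== SOURCE A (Python) =====
-- def get_all_local_contexts(tagged_tokens):  # this function creates all
--     # local contexts that occur in a sentence (all words that are
--     # contained within two items of punctuation or the start of the
--     # sentence and one item of punctuation)
--     punctuation = [",", ":", ";"]
--     all_loc_cont = []  # list to store all local contexts
--     loc_cont = []  # temporary list to store current local contexts
--
--     for token in tagged_tokens:
--         token_string = token[0]
--         if token_string in punctuation:  # if punctuation is detected,
--             # wrap up local context
--             all_loc_cont.append(" ".join(loc_cont))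
--             loc_cont = []  # reset current local context
--
--         else:  # as long as no punctuation is detected,
--             # collect tokens for current local contex
--             loc_cont.append(token_string)
--
--     all_loc_cont.append(" ".join(loc_cont))  # add the last local context
--     return all_loc_cont
-- ===== SOURCE B (Python) =====
-- def get_all_local_contexts(tagged_tokens):
--     # Different decomposition: recursively build segments (lists of token
--     # strings) from the right, then join each segment once at the end.
--     def segs(strs):
--         if not strs:
--             return [[]]
--         tail = segs(strs[1:])
--         if strs[0] in (",", ":", ";"):
--             return [[]] + tail
--         tail[0] = [strs[0]] + tail[0]
--         return tail
--     return [" ".join(seg) for seg in segs([t[0] for t in tagged_tokens])]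
-- ===== Notes on version B (the rewrite author's own statement) =====
-- stated objective: alternative
-- what changed: Replaces A's single left-to-right loop with mutable accumulator state by a right-recursive pass that builds token-list segments structurally and joins each segment once at the end.
import Mathlib
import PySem

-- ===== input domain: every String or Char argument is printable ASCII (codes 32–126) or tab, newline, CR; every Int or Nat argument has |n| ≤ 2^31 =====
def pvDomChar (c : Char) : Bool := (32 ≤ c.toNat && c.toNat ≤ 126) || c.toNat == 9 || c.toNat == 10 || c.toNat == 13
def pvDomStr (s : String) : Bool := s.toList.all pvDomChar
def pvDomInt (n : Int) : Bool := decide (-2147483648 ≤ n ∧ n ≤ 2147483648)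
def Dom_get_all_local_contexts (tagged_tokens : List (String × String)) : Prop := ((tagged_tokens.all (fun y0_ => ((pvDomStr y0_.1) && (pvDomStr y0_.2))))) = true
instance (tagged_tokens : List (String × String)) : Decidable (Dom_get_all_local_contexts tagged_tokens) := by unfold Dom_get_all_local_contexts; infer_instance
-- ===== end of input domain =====

-- ===== PORT A =====
-- header: B builds token-list segments by right recursion and joins once at the end (alternative decomposition, same cost); return-value equivalence, no mutation involved.
def pvIsPunct (s : String) : Bool := s == "," || s == ":" || s == ";"

def pvStepA (st : List String × List String) (token : String × String) : List String × List String :=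
  if pvIsPunct token.1 then (st.1 ++ [PySem.Str.join " " st.2], [])
  else (st.1, st.2 ++ [token.1])

def get_all_local_contexts (tagged_tokens : List (String × String)) : List String :=
  let st := tagged_tokens.foldl pvStepA ([], [])
  st.1 ++ [PySem.Str.join " " st.2]

-- ===== PORT B =====
def pvSegs : List String → List (List String)
  | [] => [[]]
  | s :: rest =>
    let tail := pvSegs rest
    if pvIsPunct s then [] :: tail
    else match tail with
      | h :: tl => (s :: h) :: tl
      | [] => [[s]]  -- unreachable: pvSegs never returns []

def get_all_local_contexts_alt (tagged_tokens : List (String × String)) : List String :=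
  (pvSegs (tagged_tokens.map Prod.fst)).map (PySem.Str.join " ")

-- ===== PRECONDITION & SPEC =====
def Spec_get_all_local_contexts (tagged_tokens : List (String × String)) (out : List String) : Prop := out = get_all_local_contexts_alt tagged_tokens
instance (tagged_tokens : List (String × String)) (out : List String) : Decidable (Spec_get_all_local_contexts tagged_tokens out) := by unfold Spec_get_all_local_contexts; infer_instance

-- ===== CLAIM (what is proved, stated in full; the proofs are below) =====
def Claim_equal_get_all_local_contexts : Prop := ∀ (tagged_tokens : List (String × String)), Dom_get_all_local_contexts tagged_tokens → Spec_get_all_local_contexts tagged_tokens (get_all_local_contexts tagged_tokens)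

-- ===== LEMMAS AND PROOFS =====
theorem pvSegs_ne_nil (xs : List String) : pvSegs xs ≠ [] := by
  cases xs with
  | nil => simp [pvSegs]
  | cons s rest =>
    simp only [pvSegs]
    split
    · simp
    · cases h : pvSegs rest <;> simp

-- merge a pending prefix of tokens into the first segment
def pvMerge (cur : List String) : List (List String) → List (List String)
  | [] => [cur]
  | h :: tl => (cur ++ h) :: tl

theorem pvMerge_nil (t : List (List String)) (ht : t ≠ []) : pvMerge [] t = t := by
  cases t with
  | nil => exact absurd rfl ht
  | cons h tl => simp [pvMerge]

theorem pvFoldA_eq (toks : List (String × String)) (acc cur : List String) :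
    (let st := toks.foldl pvStepA (acc, cur); st.1 ++ [PySem.Str.join " " st.2])
      = acc ++ (pvMerge cur (pvSegs (toks.map Prod.fst))).map (PySem.Str.join " ") := by
  induction toks generalizing acc cur with
  | nil => simp [pvSegs, pvMerge]
  | cons t rest ih =>
    simp only [List.foldl_cons, List.map_cons, pvSegs, pvStepA]
    by_cases hp : pvIsPunct t.1
    · simp only [hp, if_true]
      rw [ih]
      rw [pvMerge_nil _ (pvSegs_ne_nil _)]
      simp [pvMerge]
    · simp only [hp, if_false, Bool.false_eq_true]
      rw [ih]
      congr 1
      cases h : pvSegs (rest.map Prod.fst) with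
      | nil => exact absurd h (pvSegs_ne_nil _)
      | cons hd tl => simp [pvMerge]

-- ===== VERDICT (by name: the statement is the Claim_ definition above) =====
theorem get_all_local_contexts_spec : Claim_equal_get_all_local_contexts := by
  intro tt _
  show _ = _
  unfold get_all_local_contexts get_all_local_contexts_alt
  rw [pvFoldA_eq]
  rw [pvMerge_nil _ (pvSegs_ne_nil _)]
  simp
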